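-- pv_equiv track=rewrite | github.com/petteriTeikari/deep-biblio-tools | src/converters/md_to_latex/concept_boxes_enhanced.py | extract_boxes
-- ===== SOURCE A (Python) =====
-- def extract_boxes(content: str) -> list[tuple[str, str, int, int]]:
--     """Extract boxes using blockquote format."""
--     boxes = []
--     lines = content.split("\n")
--     i = 0
--
--     while i < len(lines):
--         line = lines[i].strip()
--         if line.startswith("> Technical Concept Box:"):
--             # Extract title
--             title_start = line.find("> Technical Concept Box:") + len(
--                 "> Technical Concept Box:"
--             )
--             title = line[title_start:].strip()
--
--             # Extract content (following blockquote lines)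
--             content_lines = []
--             j = i + 1
--
--             while j < len(lines):
--                 if lines[j].startswith(">"):
--                     # Remove > prefix and collect content
--                     content_line = lines[j][1:].lstrip()
--                     content_lines.append(content_line)
--                 elif not lines[j].strip():
--                     # Empty line - check if next non-empty line is still blockquote
--                     k = j + 1
--                     while k < len(lines) and not lines[k].strip():
--                         k += 1
--                     if k < len(lines) and lines[k].startswith(">"):
--                         # Continue with blockquote
--                         content_lines.append("")
--                     else:
--                         # End of blockquote
--                         break
--                 else:
--                     # Non-blockquote line - end of box
--                     break
--                 j += 1
--
--             # Clean up content
--             while content_lines and not content_lines[0].strip():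
--                 content_lines.pop(0)
--             while content_lines and not content_lines[-1].strip():
--                 content_lines.pop()
--
--             box_content = "\n".join(content_lines)
--             start_pos = i
--             end_pos = j
--             boxes.append((title, box_content, start_pos, end_pos))
--             i = j - 1
--
--         i += 1
--
--     return boxes
-- ===== SOURCE B (Python) =====
-- HEADER = "> Technical Concept Box:"
--
--
-- def _skip_blank_prefix(ls: list[str]) -> list[str]:
--     """Drop the leading run of blank lines."""
--     t = 0
--     while t < len(ls) and not ls[t].strip():
--         t += 1
--     return ls[t:]
--
--
-- def extract_boxes(content: str) -> list[tuple[str, str, int, int]]: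
--     """Extract boxes using blockquote format (segment-slice approach)."""
--     boxes = []
--     lines = content.split("\n")
--     n = len(lines)
--     i = 0
--     while i < n:
--         stripped = lines[i].strip()
--         if stripped.startswith(HEADER):
--             title = stripped[len(HEADER):].strip()
--             s = i + 1
--             # limit of the candidate segment: first line that is neither
--             # a blockquote line nor blank
--             L = s
--             while L < n and (lines[L].startswith(">") or not lines[L].strip()):
--                 L += 1
--             # the box ends right after the last '>' line of the segment
--             m = L - 1
--             while m >= s and not lines[m].startswith(">"):
--                 m -= 1
--             end_pos = m + 1 if m >= s else s
--             raw = [lines[t][1:].lstrip() if lines[t].startswith(">") else ""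
--                    for t in range(s, end_pos)]
--             trimmed = _skip_blank_prefix(_skip_blank_prefix(raw)[::-1])[::-1]
--             boxes.append((title, "\n".join(trimmed), i, end_pos))
--             i = end_pos
--         else:
--             i += 1
--     return boxes
-- ===== Notes on version B (the rewrite author's own statement) =====
-- stated objective: alternative
-- what changed: The stateful inner while-loop (with a nested blank-run look-ahead loop re-scanned at every blank line) is replaced by a segment computation: scan forward once to the first line that is neither blank nor a blockquote line, scan backward to the last blockquote line to get end_pos, build the content by a comprehension over that slice, and trim blank edges with a reusable prefix-trimmer applied twice around a reversal.
import Mathlib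
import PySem

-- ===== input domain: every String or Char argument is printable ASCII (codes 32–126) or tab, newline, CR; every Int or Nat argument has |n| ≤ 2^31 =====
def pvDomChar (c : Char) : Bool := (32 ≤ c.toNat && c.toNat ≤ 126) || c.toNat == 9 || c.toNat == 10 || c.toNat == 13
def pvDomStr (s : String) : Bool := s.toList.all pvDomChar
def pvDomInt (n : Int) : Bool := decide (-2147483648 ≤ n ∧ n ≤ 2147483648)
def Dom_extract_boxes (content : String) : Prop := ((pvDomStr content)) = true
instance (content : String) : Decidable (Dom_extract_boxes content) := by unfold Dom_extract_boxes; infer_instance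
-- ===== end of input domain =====

-- B replaces A's stateful inner loop (with its nested blank-run look-ahead) by a segment computation:
-- forward scan to the segment limit, backward scan to the last blockquote line, a comprehension over that
-- slice, and blank-edge trimming by a prefix-trimmer applied around a reversal (objective: alternative; same return value).

-- content.split("\n") (the separator is non-empty, so split? is always `some`); identical line in both Pythons
def pvLines (content : String) : List String := (PySem.Str.split? content "\n").getD []

-- ===== PORT A =====
def pvHeader : String := "> Technical Concept Box:"

-- 'while content_lines and not content_lines[-1].strip(): content_lines.pop()'
def pvPopBack (ls : List String) : List String :=
  if h : ls ≠ [] then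
    if PySem.Str.strip (ls.getLast h) = "" then pvPopBack ls.dropLast else ls
  else ls
termination_by ls.length
decreasing_by have := List.length_pos_of_ne_nil h; simp [List.length_dropLast]; omega

-- the 'k' look-ahead loop: while k < len(lines) and not lines[k].strip(): k += 1
def pvSkipBlanks (lines : List String) (k : Nat) : Nat :=
  if k < lines.length then
    if PySem.Str.strip (lines.getD k "") = "" then pvSkipBlanks lines (k+1) else k
  else k
termination_by lines.length - k
decreasing_by omega

-- A's inner 'while j < len(lines)' loop; returns (content_lines, j)
def pvInnerA (lines : List String) (j : Nat) (acc : List String) : List String × Nat :=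
  if j < lines.length then
    if PySem.Str.startswith (lines.getD j "") ">" then
      pvInnerA lines (j+1) (acc ++ [PySem.Str.lstrip (PySem.Str.slice (lines.getD j "") (some 1) none)])
    else if PySem.Str.strip (lines.getD j "") = "" then
      if pvSkipBlanks lines (j+1) < lines.length ∧
         PySem.Str.startswith (lines.getD (pvSkipBlanks lines (j+1)) "") ">" = true then
        pvInnerA lines (j+1) (acc ++ [""])
      else (acc, j)
    else (acc, j)
  else (acc, j)
termination_by lines.length - j
decreasing_by all_goals omega

-- A's outer 'while i < len(lines)' loop (fuel = one unit per iteration; i strictly increases)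
def pvOuterA (lines : List String) : Nat → Nat → List (String × String × Int × Int) → List (String × String × Int × Int)
  | 0, _, boxes => boxes
  | fuel+1, i, boxes =>
    if i < lines.length then
      if PySem.Str.startswith (PySem.Str.strip (lines.getD i "")) pvHeader then
        -- title_start = line.find(header) + len(header); title = line[title_start:].strip()
        -- i = j - 1; i += 1  ⇒  next i is j = (pvInnerA …).2
        pvOuterA lines fuel (pvInnerA lines (i+1) []).2 (boxes ++
          [(PySem.Str.strip (PySem.Str.slice (PySem.Str.strip (lines.getD i ""))
              (some (PySem.Str.find (PySem.Str.strip (lines.getD i "")) pvHeader + (PySem.Str.len pvHeader : Int))) none),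
            PySem.Str.join "\n" (pvPopBack ((pvInnerA lines (i+1) []).1.dropWhile (fun l => PySem.Str.strip l == ""))),
            (i : Int), ((pvInnerA lines (i+1) []).2 : Int))])
      else pvOuterA lines fuel (i+1) boxes
    else boxes

def extract_boxes (content : String) : List (String × String × Int × Int) :=
  let lines := pvLines content
  pvOuterA lines (lines.length + 1) 0 []

-- ===== PORT B =====
def pvHEADER : String := "> Technical Concept Box:"

-- 'while L < n and (lines[L].startswith(">") or not lines[L].strip()): L += 1'
def pvLimit (lines : List String) (L : Nat) : Nat :=
  if L < lines.length then
    if PySem.Str.startswith (lines.getD L "") ">" || (PySem.Str.strip (lines.getD L "") == "") then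
      pvLimit lines (L+1)
    else L
  else L
termination_by lines.length - L
decreasing_by omega

-- 'while m >= s and not lines[m].startswith(">"): m -= 1'
def pvLastGt (lines : List String) (s : Nat) (m : Int) : Int :=
  if h : (s : Int) ≤ m ∧ ¬ PySem.Str.startswith (lines.getD m.toNat "") ">" = true then
    pvLastGt lines s (m - 1)
  else m
termination_by (m + 1 - (s : Int)).toNat
decreasing_by omega

-- 'end_pos = m + 1 if m >= s else s'  (computed from the two scans above)
def pvEndB (lines : List String) (s : Nat) : Nat :=
  let m := pvLastGt lines s ((pvLimit lines s : Int) - 1)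
  if (s : Int) ≤ m then (m + 1).toNat else s

-- the comprehension: [lines[t][1:].lstrip() if lines[t].startswith(">") else "" for t in range(s, end_pos)]
def pvRawB (lines : List String) (s e : Nat) : List String :=
  (PySem.List.pyRange s e 1).map (fun t =>
    if PySem.Str.startswith (lines.getD t.toNat "") ">" then
      PySem.Str.lstrip (PySem.Str.slice (lines.getD t.toNat "") (some 1) none)
    else "")

-- _skip_blank_prefix: 't = 0; while t < len(ls) and not ls[t].strip(): t += 1; return ls[t:]'
def pvTrimIdx (ls : List String) (t : Nat) : Nat :=
  if t < ls.length ∧ PySem.Str.strip (ls.getD t "") = "" then pvTrimIdx ls (t+1) else t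
termination_by ls.length - t
decreasing_by omega

def pvSkipBlankPrefix (ls : List String) : List String :=
  PySem.List.slice ls (some ((pvTrimIdx ls 0 : Nat) : Int)) none

-- ls[::-1]
def pvRev (ls : List String) : List String := (PySem.List.slice? ls none none (-1)).getD []

-- B's outer 'while i < n' loop, built front-to-back (boxes.append + i = end_pos)
def pvOuterB (lines : List String) : Nat → Nat → List (String × String × Int × Int)
  | 0, _ => []
  | fuel+1, i =>
    if i < lines.length then
      if PySem.Str.startswith (PySem.Str.strip (lines.getD i "")) pvHEADER then
        (PySem.Str.strip (PySem.Str.slice (PySem.Str.strip (lines.getD i ""))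
            (some (PySem.Str.len pvHEADER)) none),
         PySem.Str.join "\n"
           (pvRev (pvSkipBlankPrefix (pvRev (pvSkipBlankPrefix (pvRawB lines (i+1) (pvEndB lines (i+1))))))),
         (i : Int), ((pvEndB lines (i+1) : Nat) : Int)) :: pvOuterB lines fuel (pvEndB lines (i+1))
      else pvOuterB lines fuel (i+1)
    else []

def extract_boxes_alt (content : String) : List (String × String × Int × Int) :=
  let lines := pvLines content
  pvOuterB lines (lines.length + 1) 0

-- ===== PRECONDITION & SPEC =====
def Spec_extract_boxes (content : String) (out : List (String × String × Int × Int)) : Prop := out = extract_boxes_alt content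
instance (content : String) (out : List (String × String × Int × Int)) : Decidable (Spec_extract_boxes content out) := by unfold Spec_extract_boxes; infer_instance

-- ===== CLAIM (what is proved, stated in full; the proofs are below) =====
def Claim_equal_extract_boxes : Prop := ∀ (content : String), Dom_extract_boxes content → Spec_extract_boxes content (extract_boxes content)

-- ===== LEMMAS AND PROOFS =====

-- a line starting with '>' is not blank
lemma pv_strip_ne_of_gt (l : String) (h : PySem.Str.startswith l ">" = true) :
    ¬ (PySem.Str.strip l = "") := by
  intro hs
  have hpre : (">" : String).toList <+: l.toList := by
    rw [PySem.Str.startswith_eq] at h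
    exact (PySem.Chars.startswith_iff _ _).1 h
  obtain ⟨t, ht⟩ := hpre
  have hs' : PySem.Chars.strip l.toList = [] := by
    have := congrArg String.toList hs
    simpa [PySem.Str.toList_strip] using this
  rw [← ht] at hs'
  have hsp : PySem.Chars.isspace '>' = false := by decide
  have hgt : ('>' : Char) ∈ PySem.Chars.lstrip ((">" : String).toList ++ t) := by
    show ('>' : Char) ∈ PySem.Chars.lstrip ('>' :: t)
    simp [PySem.Chars.lstrip, List.dropWhile, hsp]
  have hnil : PySem.Chars.rstrip (PySem.Chars.lstrip ('>' :: t)) = [] := hs'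
  rw [PySem.Chars.rstrip] at hnil
  have h2 := List.reverse_eq_nil_iff.1 hnil
  rw [List.dropWhile_eq_nil_iff] at h2
  have h3 := h2 '>' (by simpa using hgt)
  simp [hsp] at h3

lemma pv_find_header (line : String) (h : PySem.Str.startswith line pvHeader = true) :
    PySem.Str.find line pvHeader = 0 := by
  rw [PySem.Str.startswith_eq] at h
  have hpre := (PySem.Chars.startswith_iff _ _).1 h
  have hinf : (pvHeader : String).toList <:+: line.toList := hpre.isInfix
  have hnn : 0 ≤ PySem.Chars.find line.toList (pvHeader : String).toList :=
    (PySem.Chars.find_nonneg_iff _ _).2 hinf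
  have hspec := PySem.Chars.find_spec hnn
  have hz : (PySem.Chars.find line.toList (pvHeader : String).toList).toNat = 0 := by
    by_contra hne
    exact hspec.2 0 (by omega) (by simpa using hpre)
  rw [PySem.Str.find_eq]
  omega

-- ========== pvSkipBlanks facts ==========
lemma pv_skip_ge (lines : List String) (k : Nat) : k ≤ pvSkipBlanks lines k := by
  fun_induction pvSkipBlanks with
  | case1 k h hb ih => omega
  | case2 k h hb => rfl
  | case3 k h => rfl

lemma pv_skip_all_blank (lines : List String) (k : Nat) :
    ∀ t, k ≤ t → t < pvSkipBlanks lines k → PySem.Str.strip (lines.getD t "") = "" := by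
  fun_induction pvSkipBlanks with
  | case1 k h hb ih =>
    intro t ht1 ht2
    rcases Nat.eq_or_lt_of_le ht1 with rfl | hlt
    · exact hb
    · exact ih t (by omega) ht2
  | case2 k h hb => intro t ht1 ht2; omega
  | case3 k h => intro t ht1 ht2; omega

lemma pv_skip_stop_nonblank (lines : List String) (k : Nat)
    (h : pvSkipBlanks lines k < lines.length) :
    ¬ PySem.Str.strip (lines.getD (pvSkipBlanks lines k) "") = "" := by
  fun_induction pvSkipBlanks with
  | case1 k hk hb ih => exact ih h
  | case2 k hk hb => exact hb
  | case3 k hk => omega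

-- ========== pvLimit facts ==========
lemma pv_limit_ge (lines : List String) (L : Nat) : L ≤ pvLimit lines L := by
  fun_induction pvLimit with
  | case1 L h hc ih => omega
  | case2 L h hc => rfl
  | case3 L h => rfl

lemma pv_limit_step (lines : List String) (L : Nat) (h : L < lines.length)
    (hc : PySem.Str.startswith (lines.getD L "") ">" = true ∨ PySem.Str.strip (lines.getD L "") = "") :
    pvLimit lines L = pvLimit lines (L+1) := by
  conv_lhs => rw [pvLimit]
  rw [if_pos h, if_pos ?_]
  rcases hc with hc | hc
  · simp only [hc, Bool.true_or]
  · simp only [hc, beq_self_eq_true, Bool.or_true]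

lemma pv_limit_stop (lines : List String) (L : Nat) (h : L < lines.length)
    (h1 : ¬ PySem.Str.startswith (lines.getD L "") ">" = true)
    (h2 : ¬ PySem.Str.strip (lines.getD L "") = "") :
    pvLimit lines L = L := by
  rw [pvLimit, if_pos h, if_neg ?_]
  simp only [Bool.or_eq_true, beq_iff_eq]
  exact fun hc => hc.elim h1 h2

lemma pv_limit_stop_len (lines : List String) (L : Nat) (h : ¬ L < lines.length) :
    pvLimit lines L = L := by
  rw [pvLimit, if_neg h]

lemma pv_limit_skip (lines : List String) (k : Nat) :
    pvLimit lines k = pvLimit lines (pvSkipBlanks lines k) := by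
  fun_induction pvSkipBlanks with
  | case1 k h hb ih => rw [pv_limit_step lines k h (Or.inr hb)]; exact ih
  | case2 k h hb => rfl
  | case3 k h => rfl

-- ========== pvLastGt facts ==========
lemma pv_lastGt_gt_shift (lines : List String) (s : Nat)
    (hgt : PySem.Str.startswith (lines.getD s "") ">" = true) (m : Int) :
    pvLastGt lines s m = pvLastGt lines (s+1) m := by
  by_cases hm : (s : Int) ≤ m
  · induction m, hm using Int.le_induction with
    | base =>
      conv_lhs => rw [pvLastGt]
      rw [dif_neg (by intro hc; exact hc.2 (by rw [Int.toNat_natCast]; exact hgt))]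
      conv_rhs => rw [pvLastGt]
      rw [dif_neg (by intro hc; have := hc.1; push_cast at this; omega)]
    | succ m hm ih =>
      conv_lhs => rw [pvLastGt]
      conv_rhs => rw [pvLastGt]
      by_cases hg : PySem.Str.startswith (lines.getD (m+1).toNat "") ">" = true
      · rw [dif_neg (by intro hc; exact hc.2 hg), dif_neg (by intro hc; exact hc.2 hg)]
      · rw [dif_pos ⟨by omega, hg⟩, dif_pos ⟨by push_cast; omega, hg⟩,
            show m + 1 - 1 = m from by omega]
        exact ih
  · conv_lhs => rw [pvLastGt]
    rw [dif_neg (by intro hc; have := hc.1; omega)]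
    conv_rhs => rw [pvLastGt]
    rw [dif_neg (by intro hc; have := hc.1; push_cast at this; omega)]

lemma pv_lastGt_lb (lines : List String) (s t : Nat)
    (hgt : PySem.Str.startswith (lines.getD t "") ">" = true) (m : Int) (hm : (t : Int) ≤ m) :
    (t : Int) ≤ pvLastGt lines s m := by
  induction m, hm using Int.le_induction with
  | base =>
    rw [pvLastGt, dif_neg (by intro hc; exact hc.2 (by rw [Int.toNat_natCast]; exact hgt))]
  | succ m hm ih =>
    rw [pvLastGt]
    by_cases hc : (s : Int) ≤ m + 1 ∧ ¬ PySem.Str.startswith (lines.getD (m+1).toNat "") ">" = true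
    · rw [dif_pos hc, show m + 1 - 1 = m from by omega]; exact ih
    · rw [dif_neg hc]; omega

lemma pv_lastGt_blank_shift (lines : List String) (s k : Nat) (hk : s + 1 ≤ k)
    (hgt : PySem.Str.startswith (lines.getD k "") ">" = true) (m : Int) (hm : (k : Int) ≤ m) :
    pvLastGt lines s m = pvLastGt lines (s+1) m := by
  induction m, hm using Int.le_induction with
  | base =>
    conv_lhs => rw [pvLastGt]
    rw [dif_neg (by intro hc; exact hc.2 (by rw [Int.toNat_natCast]; exact hgt))]
    conv_rhs => rw [pvLastGt]
    rw [dif_neg (by intro hc; exact hc.2 (by rw [Int.toNat_natCast]; exact hgt))]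
  | succ m hm ih =>
    conv_lhs => rw [pvLastGt]
    conv_rhs => rw [pvLastGt]
    by_cases hg : PySem.Str.startswith (lines.getD (m+1).toNat "") ">" = true
    · rw [dif_neg (by intro hc; exact hc.2 hg), dif_neg (by intro hc; exact hc.2 hg)]
    · rw [dif_pos ⟨by omega, hg⟩, dif_pos ⟨by push_cast; omega, hg⟩,
          show m + 1 - 1 = m from by omega]
      exact ih

lemma pv_lastGt_none (lines : List String) (s : Nat) (m : Int)
    (h : ∀ t : Nat, s ≤ t → (t : Int) ≤ m → ¬ PySem.Str.startswith (lines.getD t "") ">" = true) :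
    pvLastGt lines s m < s := by
  by_cases hm : (s : Int) ≤ m
  · revert h
    induction m, hm using Int.le_induction with
    | base =>
      intro h
      rw [pvLastGt,
          dif_pos ⟨le_refl _, by rw [Int.toNat_natCast]; exact h s (le_refl _) (le_refl _)⟩]
      rw [pvLastGt, dif_neg (by intro hc; have := hc.1; omega)]
      omega
    | succ m hm ih =>
      intro h
      rw [pvLastGt, dif_pos ⟨by omega, h (m+1).toNat (by omega) (by omega)⟩,
          show m + 1 - 1 = m from by omega]
      exact ih (fun t ht1 ht2 => h t ht1 (by omega))
  · rw [pvLastGt, dif_neg (by intro hc; have := hc.1; omega)]; omega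

-- ========== pvEndB case lemmas ==========
lemma pv_endB_gt (lines : List String) (s : Nat) (hs : s < lines.length)
    (hgt : PySem.Str.startswith (lines.getD s "") ">" = true) :
    pvEndB lines s = pvEndB lines (s+1) ∧ s < pvEndB lines s := by
  have hL : pvLimit lines s = pvLimit lines (s+1) := pv_limit_step lines s hs (Or.inl hgt)
  have hLge : s + 1 ≤ pvLimit lines (s+1) := pv_limit_ge lines (s+1)
  have hsh : pvLastGt lines s ((pvLimit lines s : Int) - 1)
           = pvLastGt lines (s+1) ((pvLimit lines (s+1) : Int) - 1) := by
    rw [hL]; exact pv_lastGt_gt_shift lines s hgt _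
  have hlb : (s : Int) ≤ pvLastGt lines s ((pvLimit lines s : Int) - 1) :=
    pv_lastGt_lb lines s s hgt _ (by rw [hL]; omega)
  simp only [pvEndB]
  rw [← hsh]
  set m := pvLastGt lines s ((pvLimit lines s : Int) - 1) with hm
  by_cases hm1 : ((s+1 : Nat) : Int) ≤ m
  · rw [if_pos hlb, if_pos hm1]
    constructor
    · rfl
    · push_cast at hm1; omega
  · have hms : m = (s : Int) := by push_cast at hm1; omega
    rw [if_pos hlb, if_neg hm1, hms]
    constructor
    · omega
    · omega

lemma pv_endB_blank_cont (lines : List String) (s : Nat) (hs : s < lines.length)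
    (hb : PySem.Str.strip (lines.getD s "") = "")
    (hkn : pvSkipBlanks lines (s+1) < lines.length)
    (hkgt : PySem.Str.startswith (lines.getD (pvSkipBlanks lines (s+1)) "") ">" = true) :
    pvEndB lines s = pvEndB lines (s+1) ∧ s < pvEndB lines s := by
  set k := pvSkipBlanks lines (s+1) with hkdef
  have hk1 : s + 1 ≤ k := pv_skip_ge lines (s+1)
  have hL : pvLimit lines s = pvLimit lines (s+1) := pv_limit_step lines s hs (Or.inr hb)
  have hLk : pvLimit lines (s+1) = pvLimit lines k := pv_limit_skip lines (s+1)
  have hLk1 : pvLimit lines k = pvLimit lines (k+1) := pv_limit_step lines k hkn (Or.inl hkgt)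
  have hLge : k + 1 ≤ pvLimit lines (k+1) := pv_limit_ge lines (k+1)
  have hkL : (k : Int) ≤ (pvLimit lines s : Int) - 1 := by
    rw [hL, hLk, hLk1]; omega
  have hsh : pvLastGt lines s ((pvLimit lines s : Int) - 1)
           = pvLastGt lines (s+1) ((pvLimit lines (s+1) : Int) - 1) := by
    rw [hL]
    exact pv_lastGt_blank_shift lines s k hk1 hkgt _ (by rw [← hL]; exact hkL)
  have hlb : (k : Int) ≤ pvLastGt lines s ((pvLimit lines s : Int) - 1) :=
    pv_lastGt_lb lines s k hkgt _ hkL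
  simp only [pvEndB]
  rw [← hsh]
  set m := pvLastGt lines s ((pvLimit lines s : Int) - 1) with hm
  rw [if_pos (by omega), if_pos (by push_cast; omega)]
  constructor
  · rfl
  · omega

lemma pv_endB_blank_stop (lines : List String) (s : Nat) (hs : s < lines.length)
    (hb : PySem.Str.strip (lines.getD s "") = "")
    (hnk : ¬ (pvSkipBlanks lines (s+1) < lines.length ∧
              PySem.Str.startswith (lines.getD (pvSkipBlanks lines (s+1)) "") ">" = true)) :
    pvEndB lines s = s := by
  set k := pvSkipBlanks lines (s+1) with hkdef
  have hk1 : s + 1 ≤ k := pv_skip_ge lines (s+1)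
  have hL : pvLimit lines s = pvLimit lines k := by
    rw [pv_limit_step lines s hs (Or.inr hb)]; exact pv_limit_skip lines (s+1)
  have hLk : pvLimit lines k = k := by
    by_cases hkn : k < lines.length
    · have hkgt : ¬ PySem.Str.startswith (lines.getD k "") ">" = true := by
        intro hg; exact hnk ⟨hkn, hg⟩
      exact pv_limit_stop lines k hkn hkgt (pv_skip_stop_nonblank lines (s+1) hkn)
    · exact pv_limit_stop_len lines k hkn
  have hall : ∀ t : Nat, s ≤ t → (t : Int) ≤ (pvLimit lines s : Int) - 1 →
      ¬ PySem.Str.startswith (lines.getD t "") ">" = true := by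
    intro t ht1 ht2 hg
    rw [hL, hLk] at ht2
    have htk : t < k := by omega
    have hblank : PySem.Str.strip (lines.getD t "") = "" := by
      rcases Nat.eq_or_lt_of_le ht1 with rfl | hlt
      · exact hb
      · exact pv_skip_all_blank lines (s+1) t (by omega) htk
    exact pv_strip_ne_of_gt _ hg hblank
  have := pv_lastGt_none lines s ((pvLimit lines s : Int) - 1) hall
  simp only [pvEndB]
  rw [if_neg (by omega)]

lemma pv_endB_other_stop (lines : List String) (s : Nat) (hs : s < lines.length)
    (h1 : ¬ PySem.Str.startswith (lines.getD s "") ">" = true)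
    (h2 : ¬ PySem.Str.strip (lines.getD s "") = "") :
    pvEndB lines s = s := by
  have hL : pvLimit lines s = s := pv_limit_stop lines s hs h1 h2
  simp only [pvEndB]
  rw [hL, pvLastGt, dif_neg (fun hc => absurd hc.1 (by omega)), if_neg (by omega)]

lemma pv_endB_len_stop (lines : List String) (s : Nat) (hs : ¬ s < lines.length) :
    pvEndB lines s = s := by
  have hL : pvLimit lines s = s := pv_limit_stop_len lines s hs
  simp only [pvEndB]
  rw [hL, pvLastGt, dif_neg (fun hc => absurd hc.1 (by omega)), if_neg (by omega)]

-- ========== pvRawB unfolding ==========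
lemma pv_rawB_nil (lines : List String) (s e : Nat) (h : e ≤ s) : pvRawB lines s e = [] := by
  unfold pvRawB
  rw [PySem.List.pyRange_one_eq_nil (by exact_mod_cast h)]
  rfl

lemma pv_rawB_cons (lines : List String) (s e : Nat) (h : s < e) :
    pvRawB lines s e =
      (if PySem.Str.startswith (lines.getD s "") ">" then
        PySem.Str.lstrip (PySem.Str.slice (lines.getD s "") (some 1) none)
      else "") :: pvRawB lines (s+1) e := by
  unfold pvRawB
  rw [PySem.List.pyRange_one_cons (by exact_mod_cast h)]
  rw [List.map_cons]
  norm_cast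

-- ========== the inner-loop characterisation ==========
lemma pv_inner_main (lines : List String) (N : Nat) :
    ∀ s acc, lines.length - s ≤ N →
    pvInnerA lines s acc = (acc ++ pvRawB lines s (pvEndB lines s), pvEndB lines s) := by
  induction N with
  | zero =>
    intro s acc hN
    have hs : ¬ s < lines.length := by omega
    rw [pvInnerA, if_neg hs, pv_endB_len_stop lines s hs, pv_rawB_nil lines s s (le_refl _)]
    simp
  | succ N ih =>
    intro s acc hN
    rw [pvInnerA]
    by_cases hs : s < lines.length
    · rw [if_pos hs]
      by_cases hgt : PySem.Str.startswith (lines.getD s "") ">" = true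
      · rw [if_pos hgt]
        obtain ⟨he, hlt⟩ := pv_endB_gt lines s hs hgt
        rw [ih (s+1) _ (by omega), ← he, pv_rawB_cons lines s _ hlt, if_pos hgt]
        simp
      · rw [if_neg hgt]
        by_cases hb : PySem.Str.strip (lines.getD s "") = ""
        · rw [if_pos hb]
          by_cases hk : pvSkipBlanks lines (s+1) < lines.length ∧
              PySem.Str.startswith (lines.getD (pvSkipBlanks lines (s+1)) "") ">" = true
          · rw [if_pos hk]
            obtain ⟨he, hlt⟩ := pv_endB_blank_cont lines s hs hb hk.1 hk.2
            rw [ih (s+1) _ (by omega), ← he, pv_rawB_cons lines s _ hlt, if_neg hgt]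
            simp
          · rw [if_neg hk]
            rw [pv_endB_blank_stop lines s hs hb hk, pv_rawB_nil lines s s (le_refl _)]
            simp
        · rw [if_neg hb]
          rw [pv_endB_other_stop lines s hs hgt hb, pv_rawB_nil lines s s (le_refl _)]
          simp
    · rw [if_neg hs, pv_endB_len_stop lines s hs, pv_rawB_nil lines s s (le_refl _)]
      simp

-- ========== cleanup equivalence ==========
lemma pv_trim_drop (ls : List String) (t : Nat) :
    ls.drop (pvTrimIdx ls t) = (ls.drop t).dropWhile (fun l => PySem.Str.strip l == "") := by
  fun_induction pvTrimIdx with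
  | case1 t h ih =>
    rw [ih]
    have hg : ls.getD t "" = ls[t] := List.getD_eq_getElem ls "" h.1
    conv_rhs => rw [List.drop_eq_getElem_cons h.1,
                    List.dropWhile_cons_of_pos (by rw [← hg]; simpa using h.2)]
  | case2 t h =>
    by_cases ht : t < ls.length
    · have hb : ¬ PySem.Str.strip (ls.getD t "") = "" := fun hc => h ⟨ht, hc⟩
      have hg : ls.getD t "" = ls[t] := List.getD_eq_getElem ls "" ht
      conv_rhs => rw [List.drop_eq_getElem_cons ht,
                      List.dropWhile_cons_of_neg (by rw [← hg]; simpa using hb)]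
      rw [← List.drop_eq_getElem_cons ht]
    · have h1 : ls.drop t = [] := List.drop_eq_nil_of_le (by omega)
      rw [h1]
      rfl

lemma pv_skipPrefix_eq (ls : List String) :
    pvSkipBlankPrefix ls = ls.dropWhile (fun l => PySem.Str.strip l == "") := by
  unfold pvSkipBlankPrefix
  rw [PySem.List.slice_from_natCast]
  have := pv_trim_drop ls 0
  simpa using this

lemma pv_rev_eq (ls : List String) : pvRev ls = ls.reverse := by
  unfold pvRev
  rw [PySem.List.slice?_none_none_neg_one]
  rfl

lemma pv_popBack_rev (ls : List String) :
    pvPopBack ls = ((ls.reverse.dropWhile (fun l => PySem.Str.strip l == ""))).reverse := by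
  fun_induction pvPopBack with
  | case1 ls h hb ih =>
    rw [ih]
    conv_rhs => rw [← List.dropLast_append_getLast h,
                    List.reverse_append, List.reverse_singleton, List.singleton_append,
                    List.dropWhile_cons_of_pos (by simpa using hb)]
  | case2 ls h hb =>
    conv_rhs => rw [← List.dropLast_append_getLast h,
                    List.reverse_append, List.reverse_singleton, List.singleton_append,
                    List.dropWhile_cons_of_neg (by simpa using hb),
                    List.reverse_cons, List.reverse_reverse]
    rw [List.dropLast_append_getLast h]
  | case3 ls h =>
    simp at h
    simp [h]

lemma pv_cleanup_eq (ls : List String) :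
    pvRev (pvSkipBlankPrefix (pvRev (pvSkipBlankPrefix ls))) =
      pvPopBack (ls.dropWhile (fun l => PySem.Str.strip l == "")) := by
  rw [pv_popBack_rev, pv_skipPrefix_eq, pv_rev_eq, pv_skipPrefix_eq, pv_rev_eq]

-- ========== outer loops agree ==========
lemma pv_outer_eq (lines : List String) (fuel : Nat) :
    ∀ i boxes, pvOuterA lines fuel i boxes = boxes ++ pvOuterB lines fuel i := by
  induction fuel with
  | zero => intro i boxes; simp [pvOuterA, pvOuterB]
  | succ fuel ih =>
    intro i boxes
    rw [pvOuterA, pvOuterB]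
    by_cases hi : i < lines.length
    · rw [if_pos hi, if_pos hi]
      by_cases hh : PySem.Str.startswith (PySem.Str.strip (lines.getD i "")) pvHeader = true
      · rw [if_pos hh, if_pos (show PySem.Str.startswith (PySem.Str.strip (lines.getD i "")) pvHEADER = true from hh)]
        have hinner := pv_inner_main lines (lines.length - (i+1)) (i+1) [] (le_refl _)
        rw [hinner]
        simp only [List.nil_append]
        rw [ih, pv_cleanup_eq, pv_find_header _ hh]
        have hhdr : pvHeader = pvHEADER := rfl
        simp [hhdr]
      · rw [if_neg hh, if_neg (show ¬ PySem.Str.startswith (PySem.Str.strip (lines.getD i "")) pvHEADER = true from hh)]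
        exact ih _ _
    · rw [if_neg hi, if_neg hi]; simp

-- ===== VERDICT (by name: the statement is the Claim_ definition above) =====
theorem extract_boxes_spec : Claim_equal_extract_boxes := by
  intro content _
  unfold Spec_extract_boxes extract_boxes extract_boxes_alt
  rw [pv_outer_eq]
  simp
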